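-- pv_equiv track=rewrite | github.com/madolphe/Flowers-OL | flowers-ol/mot_app/get_participant_progression.py | get_cumulative_episode
-- ===== SOURCE A (Python) =====
-- import copy
--
-- def get_cumulative_episode(episodes):
--     cumulative_episodes = {}
--     len_cumulative_episodes = {}
--     episodes_tmp = []
--     for key in episodes:
--         episodes_tmp += episodes[key]
--         cumulative_episodes[key] = copy.deepcopy(episodes_tmp)
--         len_cumulative_episodes[key] = len(cumulative_episodes[key])
--     return cumulative_episodes, len_cumulative_episodes
-- ===== SOURCE B (Python) =====
-- import copy
--
-- def get_cumulative_episode(episodes):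
--     # No running accumulator: each key's cumulative list is recomputed
--     # independently as the flattening of the value lists of the keys up to
--     # and including it; lengths are then read off the finished dict.
--     keys = list(episodes)
--     cumulative = {}
--     for i, key in enumerate(keys):
--         cumulative[key] = copy.deepcopy([x for k in keys[:i + 1] for x in episodes[k]])
--     lengths = {key: len(items) for key, items in cumulative.items()}
--     return cumulative, lengths
-- ===== Notes on version B (the rewrite author's own statement) =====
-- stated objective: alternative
-- what changed: A grows one shared accumulator list and deep-copies it after every key; B keeps no running state at all: each key's cumulative list is recomputed independently by flattening the value lists of its key prefix, and the length table is derived afterwards from the finished dict instead of being recorded during accumulation.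
import Mathlib
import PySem

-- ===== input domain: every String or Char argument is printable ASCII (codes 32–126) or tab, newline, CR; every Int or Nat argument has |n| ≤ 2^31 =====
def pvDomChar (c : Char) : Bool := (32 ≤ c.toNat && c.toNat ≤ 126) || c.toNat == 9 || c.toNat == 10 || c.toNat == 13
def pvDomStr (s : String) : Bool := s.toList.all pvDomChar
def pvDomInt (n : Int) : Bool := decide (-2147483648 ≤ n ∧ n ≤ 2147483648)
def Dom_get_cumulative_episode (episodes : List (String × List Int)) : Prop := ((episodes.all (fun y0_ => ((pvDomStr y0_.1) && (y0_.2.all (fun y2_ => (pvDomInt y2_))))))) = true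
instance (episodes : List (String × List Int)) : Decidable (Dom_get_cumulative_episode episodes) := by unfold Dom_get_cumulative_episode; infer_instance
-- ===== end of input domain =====

-- B drops A's shared growing accumulator: each key's cumulative list is recomputed
-- independently by flattening its key prefix, lengths read off afterwards (objective: alternative).

-- ===== PORT A =====
def get_cumulative_episode (episodes : List (String × List Int)) : (List (String × List Int)) × (List (String × Int)) :=
  let d : PySem.Dict String (List Int) := PySem.Dict.ofList episodes
  let st := d.keys.foldl
    (fun (st : PySem.Dict String (List Int) × PySem.Dict String Int × List Int) key =>
      let tmp := st.2.2 ++ d.getD key []       -- episodes_tmp += episodes[key]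
      (st.1.insert key tmp,                    -- cumulative_episodes[key] = deepcopy(episodes_tmp)
       st.2.1.insert key (tmp.length : Int),   -- len_cumulative_episodes[key] = len(...)
       tmp))
    (PySem.Dict.empty, PySem.Dict.empty, [])
  (st.1.items, st.2.1.items)

-- ===== PORT B =====
def get_cumulative_episode_alt (episodes : List (String × List Int)) : (List (String × List Int)) × (List (String × Int)) :=
  let d : PySem.Dict String (List Int) := PySem.Dict.ofList episodes
  let keys := d.keys
  -- for i, key in enumerate(keys): cumulative[key] = deepcopy([x for k in keys[:i+1] for x in episodes[k]])
  let cumulative := (PySem.List.enumerate keys).foldl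
    (fun (c : PySem.Dict String (List Int)) p =>
      c.insert p.2 (((PySem.List.slice keys none (some (p.1 + 1))).map (fun k => d.getD k [])).flatten))
    PySem.Dict.empty
  -- lengths = {key: len(items) for key, items in cumulative.items()}
  (cumulative.items, cumulative.items.map (fun kv => (kv.1, (kv.2.length : Int))))

-- ===== PRECONDITION & SPEC =====
def Spec_get_cumulative_episode (episodes : List (String × List Int)) (out : (List (String × List Int)) × (List (String × Int))) : Prop := out = get_cumulative_episode_alt episodes
instance (episodes : List (String × List Int)) (out : (List (String × List Int)) × (List (String × Int))) : Decidable (Spec_get_cumulative_episode episodes out) := by unfold Spec_get_cumulative_episode; infer_instance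

-- ===== CLAIM =====
def Claim_equal_get_cumulative_episode : Prop := ∀ (episodes : List (String × List Int)), Dom_get_cumulative_episode episodes → Spec_get_cumulative_episode episodes (get_cumulative_episode episodes)

-- ===== LEMMAS AND PROOFS =====

-- A's combined fold, abstracted over the lookup function f := d.getD · [], as structural recursion
def aFold (f : String → List Int) :
    List String → PySem.Dict String (List Int) × PySem.Dict String Int × List Int →
    PySem.Dict String (List Int) × PySem.Dict String Int × List Int
  | [], st => st
  | k :: ks, st =>
      aFold f ks (st.1.insert k (st.2.2 ++ f k), st.2.1.insert k ((st.2.2 ++ f k).length : Int), st.2.2 ++ f k)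

-- the association list A's loop produces: key by key, accumulator-so-far ++ that key's values
def prefixList (f : String → List Int) : List Int → List String → List (String × List Int)
  | _, [] => []
  | tmp, k :: ks => (k, tmp ++ f k) :: prefixList f (tmp ++ f k) ks

theorem aFold_eq_foldl (f : String → List Int) (ks : List String)
    (st : PySem.Dict String (List Int) × PySem.Dict String Int × List Int) :
    ks.foldl (fun st key =>
      let tmp := st.2.2 ++ f key
      (st.1.insert key tmp, st.2.1.insert key (tmp.length : Int), tmp)) st = aFold f ks st := by
  induction ks generalizing st with
  | nil => rfl
  | cons k ks ih => simp only [List.foldl_cons, aFold]; exact ih _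

theorem length_prefixList (f : String → List Int) (tmp : List Int) (ks : List String) :
    (prefixList f tmp ks).length = ks.length := by
  induction ks generalizing tmp with
  | nil => rfl
  | cons k ks ih => simp [prefixList, ih]

theorem getElem_prefixList (f : String → List Int) (tmp : List Int) (ks : List String)
    (i : Nat) (h : i < ks.length) :
    (prefixList f tmp ks)[i]'(by rw [length_prefixList]; exact h)
      = (ks[i], tmp ++ ((ks.take (i + 1)).map f).flatten) := by
  induction ks generalizing tmp i with
  | nil => exact absurd h (by simp)
  | cons k ks ih =>
      cases i with
      | zero => simp [prefixList]
      | succ j =>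
          have hj : j < ks.length := by simpa using h
          simp only [prefixList, List.getElem_cons_succ, ih _ _ hj,
            List.take_succ_cons, List.map_cons, List.flatten_cons, List.append_assoc]

-- A's two dicts, as items lists: cumulative = prefixList, lengths = its lengths image
theorem aFold_items (f : String → List Int) (ks : List String)
    (c : PySem.Dict String (List Int)) (l : PySem.Dict String Int) (tmp : List Int)
    (hnd : ks.Nodup) (hc : ∀ k ∈ ks, c.contains k = false)
    (hl : ∀ k ∈ ks, l.contains k = false) :
    (aFold f ks (c, l, tmp)).1.items = c.items ++ prefixList f tmp ks ∧
    (aFold f ks (c, l, tmp)).2.1.items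
      = l.items ++ (prefixList f tmp ks).map (fun kv => (kv.1, (kv.2.length : Int))) := by
  induction ks generalizing c l tmp with
  | nil => simp [aFold, prefixList]
  | cons k ks ih =>
      rw [List.nodup_cons] at hnd
      obtain ⟨hknot, hndks⟩ := hnd
      have hne : ∀ k' ∈ ks, (k' == k) = false := by
        intro k' hk'
        simp only [beq_eq_false_iff_ne]; rintro rfl; exact hknot hk'
      have hc' : ∀ k' ∈ ks, (c.insert k (tmp ++ f k)).contains k' = false := by
        intro k' hk'
        rw [PySem.Dict.contains_insert, hne k' hk', hc k' (List.mem_cons_of_mem _ hk'), Bool.false_or]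
      have hl' : ∀ k' ∈ ks, (l.insert k ((tmp ++ f k).length : Int)).contains k' = false := by
        intro k' hk'
        rw [PySem.Dict.contains_insert, hne k' hk', hl k' (List.mem_cons_of_mem _ hk'), Bool.false_or]
      simp only [aFold, prefixList]
      obtain ⟨ih1, ih2⟩ := ih _ _ _ hndks hc' hl'
      constructor
      · rw [ih1, PySem.Dict.items_insert, hc k List.mem_cons_self]
        simp [List.append_assoc]
      · rw [ih2, PySem.Dict.items_insert, hl k List.mem_cons_self]
        simp only [Bool.false_eq_true, if_false, List.map_cons, List.append_assoc,
          List.singleton_append]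

-- B's cumulative dict, as an items list: one entry per enumerated key
theorem bItems (f : String → List Int) (keys : List String) (hnd : keys.Nodup) :
    ((PySem.List.enumerate keys).foldl
      (fun (c : PySem.Dict String (List Int)) p =>
        c.insert p.2 (((PySem.List.slice keys none (some (p.1 + 1))).map f).flatten))
      PySem.Dict.empty).items
    = (PySem.List.enumerate keys).map
        (fun p => (p.2, ((PySem.List.slice keys none (some (p.1 + 1))).map f).flatten)) := by
  have := PySem.Dict.items_foldl_insert_fresh
    (d := (PySem.Dict.empty : PySem.Dict String (List Int)))
    (l := PySem.List.enumerate keys)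
    (k := fun p => p.2)
    (v := fun p => ((PySem.List.slice keys none (some (p.1 + 1))).map f).flatten)
    (fun p _ => PySem.Dict.contains_empty p.2)
    (by rw [PySem.List.map_snd_enumerate]; exact hnd)
  simpa using this

-- B's items list equals A's prefixList, elementwise
theorem bItems_eq_prefixList (f : String → List Int) (keys : List String) :
    (PySem.List.enumerate keys).map
        (fun p => (p.2, ((PySem.List.slice keys none (some (p.1 + 1))).map f).flatten))
      = prefixList f [] keys := by
  apply List.ext_getElem
  · simp [PySem.List.length_enumerate, length_prefixList]
  · intro i h1 h2
    have hi : i < keys.length := by simpa [PySem.List.length_enumerate] using h1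
    rw [List.getElem_map, PySem.List.getElem_enumerate, getElem_prefixList f [] keys i hi]
    have hcast : (0 : Int) + (i : Int) + 1 = ((i + 1 : Nat) : Int) := by push_cast; ring
    rw [hcast, PySem.List.slice_to_natCast]
    simp

theorem get_cumulative_episode_eq (episodes : List (String × List Int)) :
    get_cumulative_episode episodes = get_cumulative_episode_alt episodes := by
  unfold get_cumulative_episode get_cumulative_episode_alt
  simp only
  set d : PySem.Dict String (List Int) := PySem.Dict.ofList episodes with hd
  have hnd : d.keys.Nodup := PySem.Dict.nodup_keys_ofList episodes
  rw [aFold_eq_foldl (fun k => d.getD k []) d.keys (PySem.Dict.empty, PySem.Dict.empty, [])]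
  obtain ⟨h1, h2⟩ := aFold_items (fun k => d.getD k []) d.keys PySem.Dict.empty PySem.Dict.empty []
    hnd (fun k _ => PySem.Dict.contains_empty k) (fun k _ => PySem.Dict.contains_empty k)
  rw [bItems (fun k => d.getD k []) d.keys hnd, bItems_eq_prefixList (fun k => d.getD k []) d.keys]
  rw [h1, h2]
  simp [PySem.Dict.empty, PySem.Dict.items]

-- ===== VERDICT =====
theorem get_cumulative_episode_spec : Claim_equal_get_cumulative_episode := by
  intro episodes _
  exact get_cumulative_episode_eq episodes
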